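-- pv_equiv track=rewrite | github.com/pypi-data/pypi-mirror-386 | packages/unicorn-eval/unicorn_eval-3.0.5.tar.gz/unicorn_eval-3.0.5/src/unicorn_eval/adaptors/detection.py | assign_cells_to_patches
-- ===== SOURCE A (Python) =====
-- def assign_cells_to_patches(cell_data, patch_coordinates, patch_size):
--     """Assign ROI cell coordinates to the correct patch."""
--     patch_cell_map = {i: [] for i in range(len(patch_coordinates))}
--
--     for x, y in cell_data:
--         for i, (x_patch, y_patch) in enumerate(patch_coordinates):
--             if (
--                 x_patch <= x < x_patch + patch_size
--                 and y_patch <= y < y_patch + patch_size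
--             ):
--                 x_local, y_local = x - x_patch, y - y_patch
--                 patch_cell_map[i].append((x_local, y_local))
--
--     return patch_cell_map
-- ===== SOURCE B (Python) =====
-- def assign_cells_to_patches(cell_data, patch_coordinates, patch_size):
--     """Assign ROI cell coordinates to patches via a spatial bucket grid:
--     each patch overlaps at most 4 grid squares of side patch_size, so a cell
--     only needs to be tested against the patches registered in its own square."""
--     patch_cell_map = {i: [] for i in range(len(patch_coordinates))}
--     if patch_size <= 0:
--         return patch_cell_map
--     buckets = {}
--     for i, (x_patch, y_patch) in enumerate(patch_coordinates):
--         bx, by = x_patch // patch_size, y_patch // patch_size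
--         for dx in (0, 1):
--             for dy in (0, 1):
--                 buckets.setdefault((bx + dx, by + dy), []).append((i, x_patch, y_patch))
--     for x, y in cell_data:
--         for i, x_patch, y_patch in buckets.get((x // patch_size, y // patch_size), ()):
--             if x_patch <= x < x_patch + patch_size and y_patch <= y < y_patch + patch_size:
--                 patch_cell_map[i].append((x - x_patch, y - y_patch))
--     return patch_cell_map
-- ===== Notes on version B (the rewrite author's own statement) =====
-- stated objective: alternative
-- what changed: B replaces A's exhaustive cell-against-every-patch scan by a spatial grid index: patches are bucketed by the at most four grid squares of side patch_size they overlap, and each cell is tested only against the patches registered in its own grid square.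
import Mathlib
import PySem

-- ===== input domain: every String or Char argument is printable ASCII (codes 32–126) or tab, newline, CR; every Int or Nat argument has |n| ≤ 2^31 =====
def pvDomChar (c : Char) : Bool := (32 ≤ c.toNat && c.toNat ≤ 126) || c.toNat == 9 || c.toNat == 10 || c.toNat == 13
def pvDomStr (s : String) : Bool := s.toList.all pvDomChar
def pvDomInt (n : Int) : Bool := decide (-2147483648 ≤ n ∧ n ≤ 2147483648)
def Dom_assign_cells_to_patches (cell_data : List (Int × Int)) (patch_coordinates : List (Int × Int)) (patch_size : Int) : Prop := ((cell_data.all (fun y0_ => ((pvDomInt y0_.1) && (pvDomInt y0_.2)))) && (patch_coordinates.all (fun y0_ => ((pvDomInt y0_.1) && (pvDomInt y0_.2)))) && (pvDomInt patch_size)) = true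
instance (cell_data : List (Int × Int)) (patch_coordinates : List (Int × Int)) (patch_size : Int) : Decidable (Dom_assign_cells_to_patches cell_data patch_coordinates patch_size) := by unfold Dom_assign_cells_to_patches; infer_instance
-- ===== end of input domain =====

-- B replaces A's cell-against-every-patch scan by a spatial grid index: patches are bucketed
-- by the at most four grid squares of side patch_size they overlap, and each cell is tested
-- only against the patches registered in its own grid square (objective: alternative).

-- ===== PORT A =====
-- A: patch_cell_map = {i: [] for i in range(len(patch_coordinates))}; then for each cell,
-- for each enumerated patch, if the cell lies in the patch, append the local coords.
def assign_cells_to_patches (cell_data : List (Int × Int)) (patch_coordinates : List (Int × Int)) (patch_size : Int) : List (Int × List (Int × Int)) :=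
  let patch_cell_map : PySem.Dict Int (List (Int × Int)) :=
    (PySem.List.pyRange 0 patch_coordinates.length 1).foldl
      (fun d i => d.insert i []) PySem.Dict.empty
  let final := cell_data.foldl
    (fun d c =>
      (PySem.List.enumerate patch_coordinates 0).foldl
        (fun d ip =>
          if ip.2.1 ≤ c.1 ∧ c.1 < ip.2.1 + patch_size ∧ ip.2.2 ≤ c.2 ∧ c.2 < ip.2.2 + patch_size
          then d.modify ip.1 [] (· ++ [(c.1 - ip.2.1, c.2 - ip.2.2)])
          else d)
        d)
    patch_cell_map
  final.items

-- ===== PORT B =====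
-- buckets: for each enumerated patch, register it under the 4 grid squares (bx+dx, by+dy)
-- register one enumerated patch entry ip under its 4 grid squares (dx, dy ∈ {0, 1})
def pvRegister (patch_size : Int) (d : PySem.Dict (Int × Int) (List (Int × (Int × Int)))) (ip : Int × (Int × Int)) : PySem.Dict (Int × Int) (List (Int × (Int × Int))) :=
  ([(0, 0), (0, 1), (1, 0), (1, 1)] : List (Int × Int)).foldl
    (fun d o =>
      d.modify (PySem.Int.floordiv ip.2.1 patch_size + o.1,
                PySem.Int.floordiv ip.2.2 patch_size + o.2) [] (· ++ [ip]))
    d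

def pvBucketsB (patch_coordinates : List (Int × Int)) (patch_size : Int) : PySem.Dict (Int × Int) (List (Int × (Int × Int))) :=
  (PySem.List.enumerate patch_coordinates 0).foldl (pvRegister patch_size) PySem.Dict.empty

def assign_cells_to_patches_alt (cell_data : List (Int × Int)) (patch_coordinates : List (Int × Int)) (patch_size : Int) : List (Int × List (Int × Int)) :=
  let patch_cell_map : PySem.Dict Int (List (Int × Int)) :=
    (PySem.List.pyRange 0 patch_coordinates.length 1).foldl
      (fun d i => d.insert i []) PySem.Dict.empty
  if patch_size ≤ 0 then patch_cell_map.items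
  else
    let buckets := pvBucketsB patch_coordinates patch_size
    let final := cell_data.foldl
      (fun d c =>
        (buckets.getD (PySem.Int.floordiv c.1 patch_size, PySem.Int.floordiv c.2 patch_size) []).foldl
          (fun d ip =>
            if ip.2.1 ≤ c.1 ∧ c.1 < ip.2.1 + patch_size ∧ ip.2.2 ≤ c.2 ∧ c.2 < ip.2.2 + patch_size
            then d.modify ip.1 [] (· ++ [(c.1 - ip.2.1, c.2 - ip.2.2)])
            else d)
          d)
      patch_cell_map
    final.items

-- ===== PRECONDITION & SPEC =====
def Spec_assign_cells_to_patches (cell_data : List (Int × Int)) (patch_coordinates : List (Int × Int)) (patch_size : Int) (out : List (Int × List (Int × Int))) : Prop := out = assign_cells_to_patches_alt cell_data patch_coordinates patch_size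
instance (cell_data : List (Int × Int)) (patch_coordinates : List (Int × Int)) (patch_size : Int) (out : List (Int × List (Int × Int))) : Decidable (Spec_assign_cells_to_patches cell_data patch_coordinates patch_size out) := by unfold Spec_assign_cells_to_patches; infer_instance

-- ===== CLAIM (what is proved, stated in full; the proofs are below) =====
def Claim_equal_assign_cells_to_patches : Prop := ∀ (cell_data : List (Int × Int)) (patch_coordinates : List (Int × Int)) (patch_size : Int), Dom_assign_cells_to_patches cell_data patch_coordinates patch_size → Spec_assign_cells_to_patches cell_data patch_coordinates patch_size (assign_cells_to_patches cell_data patch_coordinates patch_size)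

-- ===== LEMMAS AND PROOFS =====

-- "bucket b contains patch entry ip": b is one of the 4 grid squares the patch is registered in
def pvHit (s : Int) (b : Int × Int) (ip : Int × (Int × Int)) : Bool :=
  (b.1 == PySem.Int.floordiv ip.2.1 s || b.1 == PySem.Int.floordiv ip.2.1 s + 1) &&
  (b.2 == PySem.Int.floordiv ip.2.2 s || b.2 == PySem.Int.floordiv ip.2.2 s + 1)

-- a fold with an if-guard that never fires is the identity
lemma foldl_ite_false {α β : Type} (C : β → Prop) [DecidablePred C] (g : α → β → α)
    (l : List β) (d : α) (h : ∀ x ∈ l, ¬ C x) :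
    l.foldl (fun d x => if C x then g d x else d) d = d := by
  induction l generalizing d with
  | nil => rfl
  | cons x xs ih =>
    simp only [List.foldl_cons, if_neg (h x (by simp))]
    exact ih d (fun y hy => h y (by simp [hy]))

-- dropping guard-false elements from the list does not change an if-guarded fold
lemma foldl_ite_filter {α β : Type} (C : β → Prop) [DecidablePred C] (g : α → β → α)
    (p : β → Bool) (l : List β) (d : α) (h : ∀ x ∈ l, C x → p x = true) :
    (l.filter p).foldl (fun d x => if C x then g d x else d) d
      = l.foldl (fun d x => if C x then g d x else d) d := by
  induction l generalizing d with
  | nil => rfl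
  | cons x xs ih =>
    by_cases hC : C x
    · rw [List.filter_cons_of_pos (h x (by simp) hC)]
      simp only [List.foldl_cons]
      exact ih _ (fun y hy => h y (by simp [hy]))
    · by_cases hp : p x = true
      · rw [List.filter_cons_of_pos hp]
        simp only [List.foldl_cons, if_neg hC]
        exact ih d (fun y hy => h y (by simp [hy]))
      · rw [List.filter_cons_of_neg (by simpa using hp)]
        simp only [List.foldl_cons, if_neg hC]
        exact ih d (fun y hy => h y (by simp [hy]))

-- registering one patch entry into its 4 grid squares appends it to bucket b iff pvHit
lemma bucket_step_getD (s : Int) (b : Int × Int) (ip : Int × (Int × Int))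
    (d : PySem.Dict (Int × Int) (List (Int × (Int × Int)))) :
    (pvRegister s d ip).getD b []
      = d.getD b [] ++ (if pvHit s b ip then [ip] else []) := by
  obtain ⟨b1, b2⟩ := b
  unfold pvRegister
  simp only [List.foldl_cons, List.foldl_nil, PySem.Dict.getD_modify, Prod.mk.injEq,
    pvHit, Bool.and_eq_true, Bool.or_eq_true, beq_iff_eq]
  generalize PySem.Int.floordiv ip.2.1 s = fx
  generalize PySem.Int.floordiv ip.2.2 s = fy
  split_ifs <;>
    (try simp only [true_and, and_true, add_zero] at *) <;>
    first
      | (exfalso; omega)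
      | rfl
      | (rw [List.append_nil])
      | (congr 3 <;> omega)

-- the bucket dict at key b holds exactly the patch entries hitting b, in enumerate order
lemma bucket_getD (s : Int) (b : Int × Int) (l : List (Int × (Int × Int)))
    (d : PySem.Dict (Int × Int) (List (Int × (Int × Int)))) :
    (l.foldl (pvRegister s) d).getD b []
      = d.getD b [] ++ l.filter (pvHit s b) := by
  induction l generalizing d with
  | nil => simp
  | cons ip rest ih =>
    rw [List.foldl_cons, ih, bucket_step_getD]
    by_cases h : pvHit s b ip <;> simp [h]

-- a cell inside a patch has its grid square among the patch's 4 registered squares (one axis)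
lemma fdiv_two_cases {s x xp : Int} (hs : 0 < s) (h1 : xp ≤ x) (h2 : x < xp + s) :
    PySem.Int.floordiv x s = PySem.Int.floordiv xp s ∨
    PySem.Int.floordiv x s = PySem.Int.floordiv xp s + 1 := by
  rw [PySem.Int.floordiv_eq_ediv_of_pos hs, PySem.Int.floordiv_eq_ediv_of_pos hs]
  have ex : s * (x / s) + x % s = x := Int.mul_ediv_add_emod x s
  have ep : s * (xp / s) + xp % s = xp := Int.mul_ediv_add_emod xp s
  have hx1 : 0 ≤ x % s := Int.emod_nonneg x (by omega)
  have hx2 : x % s < s := Int.emod_lt_of_pos x hs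
  have hp1 : 0 ≤ xp % s := Int.emod_nonneg xp (by omega)
  have hp2 : xp % s < s := Int.emod_lt_of_pos xp hs
  have hle : xp / s ≤ x / s := by
    have h : s * (xp / s) < s * (x / s + 1) := by nlinarith
    have := Int.lt_of_mul_lt_mul_left h (le_of_lt hs)
    omega
  have hlt : x / s < xp / s + 2 := by
    have h : s * (x / s) < s * (xp / s + 2) := by nlinarith
    have := Int.lt_of_mul_lt_mul_left h (le_of_lt hs)
    omega
  omega

-- a matching patch is always among the cell's bucket candidates
lemma cond_imp_hit (s : Int) (hs : 0 < s) (c : Int × Int) (ip : Int × (Int × Int))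
    (h : ip.2.1 ≤ c.1 ∧ c.1 < ip.2.1 + s ∧ ip.2.2 ≤ c.2 ∧ c.2 < ip.2.2 + s) :
    pvHit s (PySem.Int.floordiv c.1 s, PySem.Int.floordiv c.2 s) ip = true := by
  obtain ⟨h1, h2, h3, h4⟩ := h
  have hx := fdiv_two_cases hs h1 h2
  have hy := fdiv_two_cases hs h3 h4
  simp only [pvHit, Bool.and_eq_true, Bool.or_eq_true, beq_iff_eq]
  exact ⟨by tauto, by tauto⟩

-- a fold whose step is the identity returns its start
lemma foldl_id {α β : Type} (f : α → β → α) (l : List β) (d : α) (h : ∀ d x, f d x = d) :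
    l.foldl f d = d := by
  induction l generalizing d with
  | nil => rfl
  | cons x xs ih => rw [List.foldl_cons, h]; exact ih d

-- ===== VERDICT (by name: the statement is the Claim_ definition above) =====
theorem assign_cells_to_patches_spec : Claim_equal_assign_cells_to_patches := by
  intro cd pc ps _
  unfold Spec_assign_cells_to_patches assign_cells_to_patches assign_cells_to_patches_alt
  dsimp only
  by_cases hs : ps ≤ 0
  · rw [if_pos hs]
    congr 1
    exact foldl_id _ cd _ (fun d c =>
      foldl_ite_false
        (fun ip : Int × (Int × Int) =>
          ip.2.1 ≤ c.1 ∧ c.1 < ip.2.1 + ps ∧ ip.2.2 ≤ c.2 ∧ c.2 < ip.2.2 + ps)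
        (fun d ip => d.modify ip.1 [] (· ++ [(c.1 - ip.2.1, c.2 - ip.2.2)]))
        _ d (fun ip _ => by omega))
  · rw [if_neg hs]
    congr 1
    have hstep : ∀ (d : PySem.Dict Int (List (Int × Int))) (c : Int × Int),
        ((pvBucketsB pc ps).getD
            (PySem.Int.floordiv c.1 ps, PySem.Int.floordiv c.2 ps) []).foldl
          (fun d ip =>
            if ip.2.1 ≤ c.1 ∧ c.1 < ip.2.1 + ps ∧ ip.2.2 ≤ c.2 ∧ c.2 < ip.2.2 + ps
            then d.modify ip.1 [] (· ++ [(c.1 - ip.2.1, c.2 - ip.2.2)])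
            else d) d
          = (PySem.List.enumerate pc 0).foldl
          (fun d ip =>
            if ip.2.1 ≤ c.1 ∧ c.1 < ip.2.1 + ps ∧ ip.2.2 ≤ c.2 ∧ c.2 < ip.2.2 + ps
            then d.modify ip.1 [] (· ++ [(c.1 - ip.2.1, c.2 - ip.2.2)])
            else d) d := by
      intro d c
      have hb : (pvBucketsB pc ps).getD
          (PySem.Int.floordiv c.1 ps, PySem.Int.floordiv c.2 ps) []
          = (PySem.List.enumerate pc 0).filter
              (pvHit ps (PySem.Int.floordiv c.1 ps, PySem.Int.floordiv c.2 ps)) := by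
        unfold pvBucketsB
        rw [bucket_getD]
        simp
      rw [hb]
      exact foldl_ite_filter
        (fun ip : Int × (Int × Int) =>
          ip.2.1 ≤ c.1 ∧ c.1 < ip.2.1 + ps ∧ ip.2.2 ≤ c.2 ∧ c.2 < ip.2.2 + ps)
        (fun d ip => d.modify ip.1 [] (· ++ [(c.1 - ip.2.1, c.2 - ip.2.2)]))
        _ _ d (fun ip _ hC => cond_imp_hit ps (by omega) c ip hC)
    exact congrArg (fun f => List.foldl f _ cd) (funext fun d => funext fun c => (hstep d c).symm)
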